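-- pv_equiv track=rewrite | github.com/matthieudemari/SUTD_ILP_Computing2020 | W4S2 - MT/Grades/functions/1005301/find_if_triplet.py | find_if_triplet
-- ===== SOURCE A (Python) =====
-- def find_if_triplet(my_list):
--     has_triplet = None
--     tripcounter = 0
--     for i in my_list:
--         tripcounter += 1
--         for j in my_list:
--             if(i == j):
--                 tripcounter += 1
--     if(tripcounter  % 3 == 0):
--         has_triplet = True
--     else:
--         has_triplet = False
--     return has_triplet
-- ===== SOURCE B (Python) =====
-- def find_if_triplet(my_list):
--     s = sorted(my_list)
--     total = len(s)
--     while s: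
--         run = 1
--         while run < len(s) and s[run] == s[0]:
--             run += 1
--         total += run * run
--         s = s[run:]
--     return total % 3 == 0
-- ===== Notes on version B (the rewrite author's own statement) =====
-- stated objective: faster
-- what changed: Replaces A's nested quadratic scan (for each element, rescan the whole list counting equals) by sort-then-run-length: sort a copy, walk equal runs once adding each run length squared to len(my_list), and test divisibility by 3.
import Mathlib
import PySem

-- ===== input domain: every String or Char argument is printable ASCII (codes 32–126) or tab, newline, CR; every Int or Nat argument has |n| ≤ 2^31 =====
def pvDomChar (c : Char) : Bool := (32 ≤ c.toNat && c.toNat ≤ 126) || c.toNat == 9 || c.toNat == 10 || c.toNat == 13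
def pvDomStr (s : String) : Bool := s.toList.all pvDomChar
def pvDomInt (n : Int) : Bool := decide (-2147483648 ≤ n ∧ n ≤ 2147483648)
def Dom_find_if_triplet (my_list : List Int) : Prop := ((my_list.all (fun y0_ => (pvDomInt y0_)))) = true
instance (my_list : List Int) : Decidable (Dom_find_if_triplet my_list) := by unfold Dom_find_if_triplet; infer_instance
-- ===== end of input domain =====

-- B replaces A's nested quadratic equal-counting scan by sort-then-run-length (objective: faster, O(n log n)).

-- ===== PORT A =====
def find_if_triplet (my_list : List Int) : Bool :=
  let tripcounter : Int :=
    my_list.foldl (fun tc i =>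
      my_list.foldl (fun tc2 j => if i == j then tc2 + 1 else tc2) (tc + 1)) 0
  if tripcounter % 3 == 0 then true else false

-- ===== PORT B =====
-- the 'while s:' loop of Source B: consume one equal run per step, add its length squared
def runTotal (s : List Int) : Int :=
  match s with
  | [] => 0
  | x :: xs =>
    let run : Int := ((xs.takeWhile (fun y => y == x)).length : Int) + 1
    run * run + runTotal (xs.dropWhile (fun y => y == x))
termination_by s.length
decreasing_by
  simpa using Nat.lt_succ_of_le (List.length_dropWhile_le _ _)

def find_if_triplet_alt (my_list : List Int) : Bool :=
  let s := PySem.List.sorted my_list (fun x => x) false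
  ((s.length : Int) + runTotal s) % 3 == 0

-- ===== PRECONDITION & SPEC =====
def Spec_find_if_triplet (my_list : List Int) (out : Bool) : Prop := out = find_if_triplet_alt my_list
instance (my_list : List Int) (out : Bool) : Decidable (Spec_find_if_triplet my_list out) := by unfold Spec_find_if_triplet; infer_instance

-- ===== CLAIM (what is proved, stated in full; the proofs are below) =====
def Claim_equal_find_if_triplet : Prop := ∀ (my_list : List Int), Dom_find_if_triplet my_list → Spec_find_if_triplet my_list (find_if_triplet my_list)

-- ===== LEMMAS AND PROOFS =====

-- A's counter is n + Σ_{i∈l} count(i, l)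
lemma tripcounter_eq (l : List Int) :
    l.foldl (fun tc i => l.foldl (fun tc2 j => if i == j then tc2 + 1 else tc2) (tc + 1)) 0
      = (l.length : Int) + (l.map (fun i => (l.count i : Int))).sum := by
  have h1 : ∀ (a : Int) (i : Int),
      l.foldl (fun tc2 j => if i == j then tc2 + 1 else tc2) a = a + (l.count i : Int) := by
    intro a i
    rw [← PySem.List.foldl_beq_add_one (l := l) (v := i) (a := a)]
    refine PySem.List.foldl_congr_mem l _ _ a ?_
    intro acc x _
    simp [BEq.comm]
  calc l.foldl (fun tc i => l.foldl (fun tc2 j => if i == j then tc2 + 1 else tc2) (tc + 1)) 0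
      = l.foldl (fun tc i => tc + (1 + (l.count i : Int))) 0 := by
        refine PySem.List.foldl_congr_mem l _ _ 0 ?_
        intro acc x _; rw [h1]; ring
    _ = (l.length : Int) + (l.map (fun i => (l.count i : Int))).sum := by
        rw [PySem.List.foldl_add (g := fun i => 1 + (l.count i : Int))]
        rw [PySem.List.sum_map_add_int (f := fun _ => (1:Int)) (g := fun i => (l.count i : Int))]
        rw [PySem.List.sum_map_const_int]
        ring

-- the self-count sum is permutation invariant
lemma countSum_perm {l s : List Int} (h : l.Perm s) :
    (l.map (fun i => (l.count i : Int))).sum = (s.map (fun i => (s.count i : Int))).sum := by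
  have hfun : (l.map (fun i => (l.count i : Int))) = (l.map (fun i => (s.count i : Int))) := by
    exact List.map_congr_left (by intro x _; rw [h.count_eq])
  rw [hfun]
  exact (h.map _).sum_eq

-- on a sorted list, runTotal is the self-count sum
lemma runTotal_eq (s : List Int) (hs : s.Pairwise (· ≤ ·)) :
    runTotal s = (s.map (fun i => (s.count i : Int))).sum := by
  induction s using runTotal.induct with
  | case1 => simp [runTotal]
  | case2 x xs ih =>
    rw [List.pairwise_cons] at hs
    obtain ⟨hx, hxs⟩ := hs
    set r := xs.takeWhile (fun y => y == x) with hrdef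
    set t := xs.dropWhile (fun y => y == x) with htdef
    have hsplit : xs = r ++ t := (List.takeWhile_append_dropWhile).symm
    have hr : ∀ y ∈ r, y = x := by
      intro y hy
      have := List.mem_takeWhile_imp hy
      simpa using this
    have ht : t.Pairwise (· ≤ ·) := hxs.sublist (List.dropWhile_sublist _)
    have hgt : ∀ y ∈ t, x < y := by
      cases htc : t with
      | nil => simp
      | cons h t' =>
        have hhx : (h == x) = false := by
          have hh := List.head?_dropWhile_not (p := fun y => y == x) (l := xs)
          rw [← htdef, htc] at hh
          simpa using hh
        have hhne : h ≠ x := by simpa using hhx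
        have hhmem : h ∈ xs := (List.dropWhile_sublist _).mem (htc ▸ List.mem_cons_self)
        have hxh : x < h := lt_of_le_of_ne (hx h hhmem) (Ne.symm hhne)
        intro y hy
        rcases List.mem_cons.mp hy with rfl | hy'
        · exact hxh
        · have : h ≤ y := by
            rw [htc, List.pairwise_cons] at ht
            exact ht.1 y hy'
          exact lt_of_lt_of_le hxh this
    have hcx : (x :: xs).count x = 1 + r.length := by
      rw [hsplit, List.count_cons_self, List.count_append]
      have h1 : r.count x = r.length := List.count_eq_length.mpr (fun y hy => ((hr y hy).symm ▸ rfl))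
      have h2 : t.count x = 0 := List.count_eq_zero.mpr (fun hmem => absurd (hgt x hmem) (lt_irrefl x))
      omega
    have hct : ∀ y ∈ t, (x :: xs).count y = t.count y := by
      intro y hy
      have hyne : y ≠ x := fun he => absurd (he ▸ hgt y hy) (lt_irrefl x)
      have hyr : y ∉ r := fun hyr => hyne (hr y hyr)
      rw [hsplit, List.count_cons_of_ne hyne.symm, List.count_append,
        List.count_eq_zero.mpr hyr, Nat.zero_add]
    have hdecomp : ∀ (f : Int → Int), ((x :: xs).map f).sum = f x + ((r.map f).sum + (t.map f).sum) := by
      intro f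
      rw [hsplit]
      simp [List.sum_append]
    rw [runTotal]
    rw [← hrdef, ← htdef, ih ht]
    have hmt : t.map (fun i => (((x :: xs).count i : Nat) : Int)) = t.map (fun i => ((t.count i : Nat) : Int)) :=
      List.map_congr_left (fun y hy => by rw [hct y hy])
    have hmr : r.map (fun i => (((x :: xs).count i : Nat) : Int)) = r.map (fun _ => ((r.length : Int) + 1)) :=
      List.map_congr_left (fun y hy => by rw [hr y hy, hcx]; push_cast; ring)
    rw [hdecomp (fun i => (((x :: xs).count i : Nat) : Int)), hmt, hmr,
      PySem.List.sum_map_const_int, hcx]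
    push_cast
    ring


-- ===== VERDICT (by name: the statement is the Claim_ definition above) =====
theorem find_if_triplet_spec : Claim_equal_find_if_triplet := by
  intro l _
  unfold Spec_find_if_triplet find_if_triplet find_if_triplet_alt
  have hperm : (PySem.List.sorted l (fun x => x) false).Perm l :=
    PySem.List.sorted_perm l (fun x => x) false
  have hpw : (PySem.List.sorted l (fun x => x) false).Pairwise (· ≤ ·) := by
    simpa using PySem.List.sorted_pairwise (xs := l) (key := fun x => x)
  simp only [tripcounter_eq, runTotal_eq _ hpw, countSum_perm hperm, hperm.length_eq]
  split <;> simp_all
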